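-- pv_equiv track=rewrite | github.com/jakussadnalag/interview | ukol_2.py | find_prime_palindrome
-- ===== SOURCE A (Python) =====
-- def is_prime(number):
--     for i in range(2, number):
--         if number % i == 0:
--             return False
--     return True
--
-- def is_palindrome(number):
--     return str(number) == str(number)[::-1]
--
-- def find_prime_palindrome(value):
--     if value < 2:
--         return 2
--
--     if value % 2 == 0:
--         value -= 1
--
--     while True:
--         value += 2
--         if is_palindrome(value) and is_prime(value):
--             return value
-- ===== SOURCE B (Python) =====
-- def _is_prime(n):
--     if n < 2:
--         return False
--     if n % 2 == 0:
--         return n == 2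
--     d = 3
--     while d * d <= n:
--         if n % d == 0:
--             return False
--         d += 2
--     return True
--
-- def _mirror(n):
--     r = 0
--     while n > 0:
--         r = r * 10 + n % 10
--         n //= 10
--     return r
--
-- def find_prime_palindrome(value):
--     if value < 2:
--         return 2
--     length = 1
--     while True:
--         k = (length + 1) // 2
--         for half in range(10 ** (k - 1), 10 ** k):
--             p = half * 10 ** (length // 2) + _mirror(half // (10 if length % 2 else 1))
--             if p > value and _is_prime(p):
--                 return p
--         length += 1
-- ===== Notes on version B (the rewrite author's own statement) =====
-- stated objective: faster
-- what changed: B enumerates candidate palindromes directly in increasing order (building each from its left half, by digit length) and tests only those for primality with sqrt-bounded trial division, instead of A's +2 stepping over all odd integers with a string palindrome test and full-range trial division per candidate.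
import Mathlib
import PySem

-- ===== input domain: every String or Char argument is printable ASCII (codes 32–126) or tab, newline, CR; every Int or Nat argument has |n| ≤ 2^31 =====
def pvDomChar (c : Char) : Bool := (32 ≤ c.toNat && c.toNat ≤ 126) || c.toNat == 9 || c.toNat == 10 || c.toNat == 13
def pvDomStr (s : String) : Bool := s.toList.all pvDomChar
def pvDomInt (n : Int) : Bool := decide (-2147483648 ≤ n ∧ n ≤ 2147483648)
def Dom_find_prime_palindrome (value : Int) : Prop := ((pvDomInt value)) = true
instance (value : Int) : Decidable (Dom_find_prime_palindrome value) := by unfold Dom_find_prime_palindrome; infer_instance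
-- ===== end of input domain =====

-- B replaces A's odd-stepping integer scan (with a full-range trial division) by a generator that
-- builds palindromes from their left half in increasing numeric order and tests only those for
-- primality with sqrt-bounded trial division (objective: faster).
-- Both 'while True' loops are totalized with fuel reaching the common horizon 10^12 (returning 0
-- beyond it); for every value in the domain the next prime palindrome is at most 10000500001,
-- well below the horizon, so the fueled searches compute what the Pythons return on all of Dom.

-- ===== PORT A =====
def is_prime (number : Int) : Bool :=
  -- for i in range(2, number): if number % i == 0: return False / return True
  (PySem.List.pyRange 2 number 1).all (fun i => !(PySem.Int.mod number i == 0))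

def is_palindrome (number : Int) : Bool :=
  -- str(number) == str(number)[::-1]; s[::-1] is reverse (PySem.Str.slice?_none_none_neg_one),
  -- String equality is List Char equality (PySem.Int.toList_toStr)
  PySem.Int.toChars number == (PySem.Int.toChars number).reverse

def findLoopA (fuel : Nat) (value : Int) : Int :=
  -- while True: value += 2; if is_palindrome(value) and is_prime(value): return value
  match fuel with
  | 0 => 0
  | f + 1 =>
      let v := value + 2
      if is_palindrome v && is_prime v then v else findLoopA f v

def find_prime_palindrome (value : Int) : Int :=
  if value < 2 then 2
  else
    let v := if PySem.Int.mod value 2 == 0 then value - 1 else value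
    findLoopA ((10 ^ 12 - v) / 2).toNat v

-- ===== PORT B =====
def altPrimeLoop (n d : Int) : Bool :=
  -- while d * d <= n: if n % d == 0: return False; d += 2 / return True
  if _h : d * d ≤ n then
    if PySem.Int.mod n d == 0 then false else altPrimeLoop n (d + 2)
  else true
termination_by (n + 2 - d).toNat
decreasing_by
  have h0 : 0 ≤ d * d := mul_self_nonneg d
  have hdn : d ≤ n := by nlinarith
  omega

def altIsPrime (n : Int) : Bool :=
  if n < 2 then false
  else if PySem.Int.mod n 2 == 0 then n == 2
  else altPrimeLoop n 3

def altMirror (n r : Int) : Int :=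
  -- r = 0; while n > 0: r = r * 10 + n % 10; n //= 10 / return r   (r is the accumulator)
  if h : 0 < n then altMirror (PySem.Int.floordiv n 10) (r * 10 + PySem.Int.mod n 10) else r
termination_by n.toNat
decreasing_by
  rw [PySem.Int.floordiv_eq_ediv_of_pos (by norm_num)]
  omega

def altInner (value : Int) (L : Nat) : List Int → Option Int
  -- for half in range(10**(k-1), 10**k): p = half*10**(L//2) + mirror(half // (10 if L%2 else 1));
  --   if p > value and _is_prime(p): return p
  | [] => none
  | h :: t =>
      let p := h * 10 ^ (L / 2) + altMirror (if L % 2 == 1 then PySem.Int.floordiv h 10 else h) 0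
      if value < p && altIsPrime p then some p else altInner value L t

def altOuter (fuel : Nat) (value : Int) (L : Nat) : Int :=
  -- while True: (inner loop over halves of digit-length L); length += 1
  -- the length counter 1,2,3,… is represented as a Nat; fuel 12 = horizon 10^12
  match fuel with
  | 0 => 0
  | f + 1 =>
      let k := (L + 1) / 2
      match altInner value L (PySem.List.pyRange (10 ^ (k - 1)) (10 ^ k) 1) with
      | some p => p
      | none => altOuter f value (L + 1)

def find_prime_palindrome_alt (value : Int) : Int :=
  if value < 2 then 2 else altOuter 12 value 1

-- ===== PRECONDITION & SPEC =====
def Spec_find_prime_palindrome (value : Int) (out : Int) : Prop := out = find_prime_palindrome_alt value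
instance (value : Int) (out : Int) : Decidable (Spec_find_prime_palindrome value out) := by unfold Spec_find_prime_palindrome; infer_instance

-- ===== CLAIM (what is proved, stated in full; the proofs are below) =====
def Claim_equal_find_prime_palindrome : Prop := ∀ (value : Int), Dom_find_prime_palindrome value → Spec_find_prime_palindrome value (find_prime_palindrome value)

-- ===== LEMMAS AND PROOFS =====

/-- `n` has no divisor `e` with `2 ≤ e < n` — what A's `is_prime` tests. -/
def noDiv (n : Int) : Prop := ∀ e : Int, 2 ≤ e → e < n → ¬ e ∣ n

/-- the candidate predicate both searches look for, at horizon `10^12` -/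
def G (value n : Int) : Prop :=
  value < n ∧ n < 10 ^ 12 ∧ is_palindrome n = true ∧ is_prime n = true

-- §1 primality
lemma is_prime_iff (n : Int) : is_prime n = true ↔ noDiv n := by
  unfold is_prime noDiv
  rw [List.all_eq_true]
  constructor
  · intro H e he hen hdvd
    have hm := H e (by rw [PySem.List.mem_pyRange_one]; omega)
    simp only [Bool.not_eq_eq_eq_not, Bool.not_true, beq_eq_false_iff_ne, ne_eq] at hm
    exact hm ((PySem.Int.mod_eq_zero_iff_dvd n e).mpr hdvd)
  · intro H i hi
    rw [PySem.List.mem_pyRange_one] at hi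
    simp only [Bool.not_eq_eq_eq_not, Bool.not_true, beq_eq_false_iff_ne, ne_eq]
    intro hz
    exact H i hi.1 hi.2 ((PySem.Int.mod_eq_zero_iff_dvd n i).mp hz)


lemma is_prime_even (n : Int) (h2 : 2 < n) (he : (2 : Int) ∣ n) : is_prime n = false := by
  cases h : is_prime n
  · rfl
  · exact absurd he ((is_prime_iff n).mp h 2 le_rfl h2)


lemma altPrimeLoop_iff (n d : Int) (hn : 2 < n) (hodd : ¬ (2:Int) ∣ n) (hd3 : 3 ≤ d)
    (hdo : d % 2 = 1) (inv : ∀ e : Int, 2 ≤ e → e < d → ¬ e ∣ n) :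
    (altPrimeLoop n d = true ↔ noDiv n) := by
  revert hd3 hdo inv
  induction d using altPrimeLoop.induct n with
  | case1 d hdd hmod =>
    intro hd3 hdo inv
    -- d*d ≤ n, d ∣ n : loop = false, and noDiv fails at d
    rw [altPrimeLoop]
    simp only [hdd, if_pos, hmod, if_true, dite_eq_ite, if_true]
    simp only [beq_iff_eq] at hmod
    have hdvd : d ∣ n := (PySem.Int.mod_eq_zero_iff_dvd n d).mp hmod
    have hdn : d < n := by nlinarith
    simp only [Bool.false_eq_true, false_iff]
    intro H
    exact H d (by omega) hdn hdvd
  | case2 d hdd hmod ih =>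
    intro hd3 hdo inv
    rw [altPrimeLoop]
    simp only [hdd, dite_true, hmod, if_false, dite_eq_ite, if_true]
    simp only [beq_iff_eq] at hmod
    have hndvd : ¬ d ∣ n := fun hc => hmod ((PySem.Int.mod_eq_zero_iff_dvd n d).mpr hc)
    apply ih (by omega) (by omega)
    intro e he2 helt hdvd
    rcases lt_or_ge e d with h | h
    · exact inv e he2 h hdvd
    · have : e = d ∨ e = d + 1 := by omega
      rcases this with rfl | rfl
      · exact hndvd hdvd
      · exact hodd (dvd_trans ⟨(d + 1) / 2, by omega⟩ hdvd)
  | case3 d hdd =>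
    intro hd3 hdo inv
    rw [altPrimeLoop]
    simp only [hdd, dite_false, true_iff]
    intro e he2 hen hdvd
    have hd' : ¬ e < d := fun hc => inv e he2 hc hdvd
    obtain ⟨f, hf⟩ := hdvd
    have hf0 : 0 < f := by nlinarith
    have hf1 : f ≠ 1 := by rintro rfl; omega
    have hf2 : 2 ≤ f := by omega
    have hfn : f < n := by nlinarith
    have hfd : ¬ f < d := fun hc => inv f hf2 hc ⟨e, by rw [hf]; ring⟩
    nlinarith


lemma altIsPrime_eq (n : Int) (h : 2 ≤ n) : altIsPrime n = is_prime n := by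
  unfold altIsPrime
  rw [if_neg (by omega)]
  have hmod2 : PySem.Int.mod n 2 = n % 2 := PySem.Int.mod_eq_emod_of_pos (by norm_num)
  by_cases h2 : n % 2 = 0
  · rw [if_pos (by simp [hmod2, h2])]
    rcases eq_or_lt_of_le h with rfl | hgt
    · simp [is_prime]
    · have : is_prime n = false := by
        apply (by cases hp : is_prime n with
          | true => exact fun hh => absurd ((is_prime_iff n).mp hp 2 le_rfl hgt hh) (fun q => q)
          | false => exact fun _ => rfl : (2:Int) ∣ n → is_prime n = false)
        omega
      rw [this]
      simp
      omega
  · rw [if_neg (by simp [hmod2, h2])]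
    have hgt : 2 < n := by omega
    have hodd : ¬ (2:Int) ∣ n := by omega
    rcases hp : is_prime n with _ | _
    · cases hq : altPrimeLoop n 3
      · rfl
      · exact absurd ((is_prime_iff n).mpr ((altPrimeLoop_iff n 3 hgt hodd le_rfl rfl (by intro e he1 he2 hd; interval_cases e; exact hodd hd)).mp hq)) (by simp [hp])
    · exact (altPrimeLoop_iff n 3 hgt hodd le_rfl rfl (by intro e he1 he2 hd; interval_cases e; exact hodd hd)).mpr ((is_prime_iff n).mp hp)


-- §2 str(n) as the reversed decimal digit list
lemma toDigitsCore_rep (f : ℕ) : ∀ (m : ℕ) (l : List Char), m < 10 ^ f →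
    0 < f → Nat.toDigitsCore 10 f m l =
      (if m = 0 then ['0'] else ((Nat.digits 10 m).map Nat.digitChar).reverse) ++ l := by
  induction f with
  | zero => intro m l hm hf; omega
  | succ f ih =>
    intro m l hm _
    rw [Nat.toDigitsCore]
    by_cases h0 : m = 0
    · subst h0; simp; decide
    · by_cases h10 : m / 10 = 0
      · have hlt : m < 10 := by omega
        simp only [h10, if_true, if_neg h0]
        rw [Nat.digits_def' (by norm_num) (by omega)]
        have : Nat.digits 10 (m / 10) = [] := by rw [h10]; simp
        rw [this]
        simp [Nat.mod_eq_of_lt hlt]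
      · simp only [h10, if_false, if_neg h0]
        have hdiv : m / 10 < 10 ^ f := by
          rw [Nat.div_lt_iff_lt_mul (by norm_num)]
          calc m < 10 ^ (f + 1) := hm
          _ = 10 ^ f * 10 := by ring
        have hfpos : 0 < f := by
          rcases Nat.eq_zero_or_pos f with rfl | hf
          · simp at hdiv; omega
          · exact hf
        rw [ih (m / 10) _ hdiv hfpos]
        rw [if_neg h10]
        rw [Nat.digits_def' (by norm_num) (show 0 < m by omega),
            Nat.digits_def' (by norm_num) (show 0 < m / 10 by omega)]
        simp


lemma toDigits_rep (m : ℕ) :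
    Nat.toDigits 10 m = if m = 0 then ['0'] else ((Nat.digits 10 m).map Nat.digitChar).reverse := by
  have : Nat.toDigits 10 m = Nat.toDigitsCore 10 (m + 1) m [] := rfl
  rw [this, toDigitsCore_rep (m + 1) m [] (by
    calc m < 10 ^ m := Nat.lt_pow_self (by norm_num)
    _ ≤ 10 ^ (m + 1) := Nat.pow_le_pow_right (by norm_num) (by omega)) (by omega)]
  simp


lemma digitChar_inj : ∀ a < 10, ∀ b < 10, Nat.digitChar a = Nat.digitChar b → a = b := by decide

lemma map_digitChar_inj : ∀ (l₁ l₂ : List ℕ), (∀ x ∈ l₁, x < 10) → (∀ x ∈ l₂, x < 10) →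
    l₁.map Nat.digitChar = l₂.map Nat.digitChar → l₁ = l₂ := by
  intro l₁
  induction l₁ with
  | nil => intro l₂ _ _ h; cases l₂ <;> simp_all
  | cons a t ih =>
    intro l₂ h₁ h₂ h
    cases l₂ with
    | nil => simp_all
    | cons b t₂ =>
      simp only [List.map_cons, List.cons.injEq] at h
      have hab := digitChar_inj a (h₁ a (by simp)) b (h₂ b (by simp)) h.1
      subst hab
      simp only [List.cons.injEq, true_and]
      exact ih t₂ (fun x hx => h₁ x (by simp [hx])) (fun x hx => h₂ x (by simp [hx])) h.2

lemma is_palindrome_iff (n : Int) (h : 0 ≤ n) :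
    is_palindrome n = true ↔ (Nat.digits 10 n.toNat).reverse = Nat.digits 10 n.toNat := by
  unfold is_palindrome
  rw [beq_iff_eq]
  have hchars : PySem.Int.toChars n = Nat.toDigits 10 n.toNat := by
    unfold PySem.Int.toChars
    rw [if_neg (by omega)]
  rw [hchars, toDigits_rep]
  by_cases h0 : n.toNat = 0
  · simp [h0]
  · rw [if_neg h0]
    set dl := Nat.digits 10 n.toNat with hdl
    constructor
    · intro hh
      rw [List.reverse_reverse] at hh
      apply map_digitChar_inj _ _
      · intro x hx; exact Nat.digits_lt_base (by norm_num) (List.mem_reverse.mp hx)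
      · intro x hx; exact Nat.digits_lt_base (by norm_num) hx
      · rw [List.map_reverse, hh]
    · intro hh
      rw [List.reverse_reverse, ← List.map_reverse, hh]


-- §3 palindromes from their left half
lemma digits_tail (m : ℕ) : (Nat.digits 10 m).tail = Nat.digits 10 (m / 10) := by
  rcases Nat.eq_zero_or_pos m with rfl | hm
  · simp
  · rw [Nat.digits_def' (by norm_num) hm]
    rfl


lemma digits_div_pow (i : ℕ) : ∀ m : ℕ, Nat.digits 10 (m / 10 ^ i) = (Nat.digits 10 m).drop i := by
  induction i with
  | zero => intro m; simp
  | succ i ih =>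
    intro m
    have : m / 10 ^ (i + 1) = m / 10 ^ i / 10 := by
      rw [Nat.div_div_eq_div_mul, pow_succ]
    rw [this, ← digits_tail, ih m, List.tail_drop]


/-- the palindrome with `L` digits whose left half (of `⌈L/2⌉` digits) is `h` -/
def buildN (L h : ℕ) : ℕ :=
  h * 10 ^ (L / 2) + Nat.ofDigits 10 ((Nat.digits 10 (h / 10 ^ (L % 2))).reverse)

lemma altMirror_eq (m : ℕ) (r : Int) :
    altMirror (m : Int) r
      = r * 10 ^ (Nat.digits 10 m).length + ((Nat.ofDigits 10 (Nat.digits 10 m).reverse : ℕ) : ℤ) := by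
  induction m using Nat.strong_induction_on generalizing r with
  | _ m ih =>
    rcases Nat.eq_zero_or_pos m with rfl | hm
    · rw [altMirror]
      simp
    · rw [altMirror, dif_pos (by exact_mod_cast hm)]
      have hfd : PySem.Int.floordiv (m : Int) 10 = ((m / 10 : ℕ) : ℤ) := by
        simpa using PySem.Int.floordiv_natCast m 10
      have hmd : PySem.Int.mod (m : Int) 10 = ((m % 10 : ℕ) : ℤ) := by
        simpa using PySem.Int.mod_natCast m 10
      rw [hfd, hmd, ih (m / 10) (Nat.div_lt_self hm (by norm_num))]
      rw [Nat.digits_def' (show (1:ℕ) < 10 by norm_num) hm]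
      simp only [List.length_cons, List.reverse_cons]
      rw [Nat.ofDigits_append]
      simp [Nat.ofDigits_singleton]
      push_cast
      ring


lemma pexp_eq (L : ℕ) (h : Int) (h0 : 0 ≤ h) :
    h * 10 ^ (L / 2) + altMirror (if L % 2 == 1 then PySem.Int.floordiv h 10 else h) 0
      = ((buildN L h.toNat : ℕ) : ℤ) := by
  obtain ⟨m, rfl⟩ : ∃ m : ℕ, h = (m : ℤ) := ⟨h.toNat, by omega⟩
  have harg : (if L % 2 == 1 then PySem.Int.floordiv (m : ℤ) 10 else (m : ℤ))
      = ((m / 10 ^ (L % 2) : ℕ) : ℤ) := by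
    have h01 : L % 2 = 0 ∨ L % 2 = 1 := by omega
    rcases h01 with he | he <;> simp [he, PySem.Int.floordiv_natCast]
  rw [harg, altMirror_eq]
  simp only [Int.toNat_natCast]
  unfold buildN
  push_cast
  ring


lemma digits_buildN (L h : ℕ) (hL : 1 ≤ L)
    (hlo : 10 ^ ((L + 1) / 2 - 1) ≤ h) (hhi : h < 10 ^ ((L + 1) / 2)) :
    Nat.digits 10 (buildN L h) = (Nat.digits 10 (h / 10 ^ (L % 2))).reverse ++ Nat.digits 10 h := by
  have hh0 : h ≠ 0 := by
    have : 0 < 10 ^ ((L + 1) / 2 - 1) := by positivity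
    omega
  have hlen : (Nat.digits 10 h).length = (L + 1) / 2 := by
    have h1 : (Nat.digits 10 h).length ≤ (L + 1) / 2 := (Nat.digits_length_le_iff (by norm_num) h).mpr hhi
    have h2 : (L + 1) / 2 - 1 < (Nat.digits 10 h).length := (Nat.lt_digits_length_iff (by norm_num) h).mpr hlo
    omega
  have hdrop : Nat.digits 10 (h / 10 ^ (L % 2)) = (Nat.digits 10 h).drop (L % 2) :=
    digits_div_pow (L % 2) h
  have hlen2 : (Nat.digits 10 (h / 10 ^ (L % 2))).length = L / 2 := by
    rw [hdrop, List.length_drop, hlen]; omega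
  have hofd : buildN L h = Nat.ofDigits 10 ((Nat.digits 10 (h / 10 ^ (L % 2))).reverse ++ Nat.digits 10 h) := by
    rw [Nat.ofDigits_append, List.length_reverse, hlen2, Nat.ofDigits_digits]
    unfold buildN
    ring
  rw [hofd]
  apply Nat.digits_ofDigits 10 (by norm_num)
  · intro x hx
    rcases List.mem_append.mp hx with hx | hx
    · exact Nat.digits_lt_base (by norm_num) (by
        rw [hdrop] at hx
        exact List.mem_of_mem_drop (List.mem_reverse.mp hx))
    · exact Nat.digits_lt_base (by norm_num) hx
  · intro hne
    rw [List.getLast_append_of_right_ne_nil _ _ (by simp [Nat.digits_ne_nil_iff_ne_zero, hh0])]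
    exact Nat.getLast_digit_ne_zero 10 hh0


lemma buildN_pal (L h : ℕ) (hL : 1 ≤ L)
    (hlo : 10 ^ ((L + 1) / 2 - 1) ≤ h) (hhi : h < 10 ^ ((L + 1) / 2)) :
    (Nat.digits 10 (buildN L h)).reverse = Nat.digits 10 (buildN L h) := by
  rw [digits_buildN L h hL hlo hhi, digits_div_pow]
  have h01 : L % 2 = 0 ∨ L % 2 = 1 := by omega
  rcases h01 with he | he
  · simp [he]
  · rw [he]
    rcases hd : Nat.digits 10 h with _ | ⟨a, t⟩
    · simp
    · simp [List.reverse_append]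


lemma buildN_len (L h : ℕ) (hL : 1 ≤ L)
    (hlo : 10 ^ ((L + 1) / 2 - 1) ≤ h) (hhi : h < 10 ^ ((L + 1) / 2)) :
    (Nat.digits 10 (buildN L h)).length = L := by
  rw [digits_buildN L h hL hlo hhi]
  have hh0 : h ≠ 0 := by
    have : 0 < 10 ^ ((L + 1) / 2 - 1) := by positivity
    omega
  have hlen : (Nat.digits 10 h).length = (L + 1) / 2 := by
    have h1 : (Nat.digits 10 h).length ≤ (L + 1) / 2 := (Nat.digits_length_le_iff (by norm_num) h).mpr hhi
    have h2 : (L + 1) / 2 - 1 < (Nat.digits 10 h).length := (Nat.lt_digits_length_iff (by norm_num) h).mpr hlo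
    omega
  rw [List.length_append, List.length_reverse, digits_div_pow, List.length_drop, hlen]
  omega


lemma buildN_bounds (L h : ℕ) (hL : 1 ≤ L)
    (hlo : 10 ^ ((L + 1) / 2 - 1) ≤ h) (hhi : h < 10 ^ ((L + 1) / 2)) :
    10 ^ (L - 1) ≤ buildN L h ∧ buildN L h < 10 ^ L := by
  have hlen := buildN_len L h hL hlo hhi
  constructor
  · exact (Nat.lt_digits_length_iff (by norm_num) _).mp (by rw [hlen]; omega)
  · exact (Nat.digits_length_le_iff (by norm_num) _).mp (by rw [hlen])


lemma mirror_part_lt (L h : ℕ) (hhi : h < 10 ^ ((L + 1) / 2)) :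
    Nat.ofDigits 10 ((Nat.digits 10 (h / 10 ^ (L % 2))).reverse) < 10 ^ (L / 2) := by
  have hlen : (Nat.digits 10 (h / 10 ^ (L % 2))).length ≤ L / 2 := by
    rw [digits_div_pow, List.length_drop]
    have := (Nat.digits_length_le_iff (show (1:ℕ) < 10 by norm_num) h).mpr hhi
    omega
  calc Nat.ofDigits 10 ((Nat.digits 10 (h / 10 ^ (L % 2))).reverse)
      < 10 ^ ((Nat.digits 10 (h / 10 ^ (L % 2))).reverse).length :=
        Nat.ofDigits_lt_base_pow_length (by norm_num)
          (fun x hx => Nat.digits_lt_base (by norm_num) (List.mem_reverse.mp hx))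
    _ ≤ 10 ^ (L / 2) := Nat.pow_le_pow_right (by norm_num) (by rw [List.length_reverse]; exact hlen)

lemma buildN_mono (L h1 h2 : ℕ) (hh : h1 < h2) (hhi : h1 < 10 ^ ((L + 1) / 2)) :
    buildN L h1 < buildN L h2 := by
  have hm1 := mirror_part_lt L h1 hhi
  unfold buildN
  have : h1 * 10 ^ (L / 2) + 10 ^ (L / 2) ≤ h2 * 10 ^ (L / 2) := by
    have := Nat.succ_le_of_lt hh
    calc h1 * 10 ^ (L / 2) + 10 ^ (L / 2) = (h1 + 1) * 10 ^ (L / 2) := by ring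
      _ ≤ h2 * 10 ^ (L / 2) := Nat.mul_le_mul_right _ (by omega)
  omega


lemma buildN_complete (L n : ℕ) (hn : n ≠ 0)
    (hpal : (Nat.digits 10 n).reverse = Nat.digits 10 n)
    (hlen : (Nat.digits 10 n).length = L) :
    10 ^ ((L + 1) / 2 - 1) ≤ n / 10 ^ (L / 2) ∧ n / 10 ^ (L / 2) < 10 ^ ((L + 1) / 2) ∧
      buildN L (n / 10 ^ (L / 2)) = n := by
  have hL1 : 1 ≤ L := by
    rw [← hlen]
    have : Nat.digits 10 n ≠ [] := by simp [Nat.digits_ne_nil_iff_ne_zero, hn]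
    cases hq : Nat.digits 10 n with
    | nil => exact absurd hq this
    | cons a t => simp
  set h := n / 10 ^ (L / 2) with hh
  have hdh : Nat.digits 10 h = (Nat.digits 10 n).drop (L / 2) := digits_div_pow (L / 2) n
  have hdhlen : (Nat.digits 10 h).length = (L + 1) / 2 := by
    rw [hdh, List.length_drop, hlen]; omega
  have hne : Nat.digits 10 h ≠ [] := by
    intro hq
    rw [hq] at hdhlen
    simp at hdhlen
    omega
  have hh0 : h ≠ 0 := by
    intro hq
    rw [hq] at hne
    simp at hne
  refine ⟨?_, ?_, ?_⟩
  · exact (Nat.lt_digits_length_iff (by norm_num) _).mp (by rw [hdhlen]; omega)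
  · exact (Nat.digits_length_le_iff (by norm_num) _).mp (by rw [hdhlen])
  · -- buildN L h = n
    have hdrop2 : Nat.digits 10 (h / 10 ^ (L % 2)) = (Nat.digits 10 n).drop ((L + 1) / 2) := by
      rw [digits_div_pow, hdh, List.drop_drop]
      congr 1
      omega
    have hrev : (Nat.digits 10 (h / 10 ^ (L % 2))).reverse = (Nat.digits 10 n).take (L / 2) := by
      rw [hdrop2, List.reverse_drop, hlen, hpal]
      congr 1
      omega
    have hmod : Nat.ofDigits 10 ((Nat.digits 10 (h / 10 ^ (L % 2))).reverse) = n % 10 ^ (L / 2) := by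
      rw [hrev, ← Nat.self_mod_pow_eq_ofDigits_take _ _ (by norm_num)]
    unfold buildN
    rw [hmod, hh, mul_comm]
    exact Nat.div_add_mod n _


-- §4 the two searches
lemma findLoopA_found (f : ℕ) : ∀ (v m : Int), v < m → m ≤ v + 2 * f →
    (m - v) % 2 = 0 → (is_palindrome m && is_prime m) = true →
    (∀ j, v < j → j < m → (j - v) % 2 = 0 → (is_palindrome j && is_prime j) = false) →
    findLoopA f v = m := by
  induction f with
  | zero =>
    intro v m h1 h2 _ _ _
    exfalso
    push_cast at h2
    omega
  | succ f ih =>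
    intro v m h1 h2 hpar hm hmin
    rw [findLoopA]
    by_cases hc : m = v + 2
    · subst hc
      simp [hm]
    · have hlt : v + 2 < m := by omega
      have hfalse := hmin (v + 2) (by omega) hlt (by omega)
      simp only [hfalse, if_false, Bool.false_eq_true]
      exact ih (v + 2) m hlt (by push_cast at h2 ⊢; omega) (by omega) hm
        (fun j hj1 hj2 hj3 => hmin j (by omega) hj2 (by omega))

lemma findLoopA_none (f : ℕ) : ∀ (v : Int),
    (∀ j, v < j → j ≤ v + 2 * f → (j - v) % 2 = 0 → (is_palindrome j && is_prime j) = false) →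
    findLoopA f v = 0 := by
  induction f with
  | zero => intro v _; rfl
  | succ f ih =>
    intro v hall
    rw [findLoopA]
    have hfalse := hall (v + 2) (by omega) (by push_cast; omega) (by omega)
    simp only [hfalse, if_false, Bool.false_eq_true]
    exact ih (v + 2) (fun j hj1 hj2 hj3 => hall j (by omega) (by push_cast at hj2 ⊢; omega) (by omega))

/-- the candidate value `altInner` computes from the half `h` -/
def pexp (L : ℕ) (h : Int) : Int :=
  h * 10 ^ (L / 2) + altMirror (if L % 2 == 1 then PySem.Int.floordiv h 10 else h) 0

lemma altInner_cons (value : Int) (L : ℕ) (h : Int) (t : List Int) :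
    altInner value L (h :: t) =
      if value < pexp L h && altIsPrime (pexp L h) then some (pexp L h)
      else altInner value L t := rfl

lemma pexp_eqN (L : ℕ) (h : Int) (h0 : 0 ≤ h) : pexp L h = ((buildN L h.toNat : ℕ) : ℤ) := by
  unfold pexp
  exact pexp_eq L h h0

lemma altInner_none (value : Int) (L : ℕ) : ∀ (xs : List Int),
    (∀ h ∈ xs, (value < pexp L h && altIsPrime (pexp L h)) = false) →
    altInner value L xs = none := by
  intro xs
  induction xs with
  | nil => intro _; rfl
  | cons h t ih =>
    intro hall
    rw [altInner_cons, hall h (by simp)]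
    simp only [Bool.false_eq_true, if_false]
    exact ih (fun x hx => hall x (by simp [hx]))

lemma altInner_found (value : Int) (L : ℕ) (xs ys : List Int) (h₀ : Int)
    (hnone : ∀ h ∈ xs, (value < pexp L h && altIsPrime (pexp L h)) = false)
    (hyes : (value < pexp L h₀ && altIsPrime (pexp L h₀)) = true) :
    altInner value L (xs ++ h₀ :: ys) = some (pexp L h₀) := by
  induction xs with
  | nil => rw [List.nil_append, altInner_cons, hyes]; simp
  | cons h t ih =>
    rw [List.cons_append, altInner_cons, hnone h (by simp)]
    simp only [Bool.false_eq_true, if_false]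
    exact ih (fun x hx => hnone x (by simp [hx]))

-- bridge: the candidates of length L are good iff G, below the horizon
lemma pexp_facts (L : ℕ) (h : Int) (hL : 1 ≤ L)
    (hmem : h ∈ PySem.List.pyRange (10 ^ ((L + 1) / 2 - 1)) (10 ^ ((L + 1) / 2)) 1) :
    0 ≤ h ∧ pexp L h = ((buildN L h.toNat : ℕ) : ℤ) ∧
      (10:ℤ) ^ (L - 1) ≤ pexp L h ∧ pexp L h < 10 ^ L ∧
      is_palindrome (pexp L h) = true := by
  rw [PySem.List.mem_pyRange_one] at hmem
  have hcl : ((10 ^ ((L + 1) / 2 - 1) : ℕ) : ℤ) = (10:ℤ) ^ ((L + 1) / 2 - 1) := by push_cast; ring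
  have hch : ((10 ^ ((L + 1) / 2) : ℕ) : ℤ) = (10:ℤ) ^ ((L + 1) / 2) := by push_cast; ring
  have h0 : 0 ≤ h := by
    have : (0:ℤ) < 10 ^ ((L + 1) / 2 - 1) := by positivity
    omega
  have hlo : 10 ^ ((L + 1) / 2 - 1) ≤ h.toNat := by
    have := hmem.1
    rw [← hcl] at this
    omega
  have hhi : h.toNat < 10 ^ ((L + 1) / 2) := by
    have := hmem.2
    rw [← hch] at this
    omega
  have hpe : pexp L h = ((buildN L h.toNat : ℕ) : ℤ) := pexp_eq L h h0
  have hb := buildN_bounds L h.toNat hL hlo hhi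
  refine ⟨h0, hpe, ?_, ?_, ?_⟩
  · rw [hpe]
    calc (10:ℤ) ^ (L - 1) = ((10 ^ (L - 1) : ℕ) : ℤ) := by push_cast; ring
    _ ≤ _ := by exact_mod_cast hb.1
  · rw [hpe]
    calc ((buildN L h.toNat : ℕ) : ℤ) < ((10 ^ L : ℕ) : ℤ) := by exact_mod_cast hb.2
    _ = (10:ℤ) ^ L := by push_cast; ring
  · rw [hpe, is_palindrome_iff _ (by positivity), Int.toNat_natCast]
    exact buildN_pal L h.toNat hL hlo hhi

lemma G_of_build (value : Int) (L : ℕ) (h : Int) (hL : 1 ≤ L) (hL12 : L ≤ 12)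
    (hmem : h ∈ PySem.List.pyRange (10 ^ ((L + 1) / 2 - 1)) (10 ^ ((L + 1) / 2)) 1)
    (htest : (value < pexp L h && altIsPrime (pexp L h)) = true) (hv : 2 ≤ value) :
    G value (pexp L h) := by
  obtain ⟨h0, hpe, hlo, hhi, hpal⟩ := pexp_facts L h hL hmem
  rw [Bool.and_eq_true, decide_eq_true_eq] at htest
  have hgt : value < pexp L h := htest.1
  have h2 : 2 ≤ pexp L h := by omega
  refine ⟨hgt, ?_, hpal, ?_⟩
  · calc pexp L h < 10 ^ L := hhi
    _ ≤ 10 ^ 12 := by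
      apply pow_le_pow_right₀ (by norm_num) hL12
  · rw [← altIsPrime_eq _ h2]
    exact htest.2

lemma pexp_lt_pow (L : ℕ) (h : Int) (hL : 1 ≤ L)
    (hmem : h ∈ PySem.List.pyRange (10 ^ ((L + 1) / 2 - 1)) (10 ^ ((L + 1) / 2)) 1) :
    pexp L h < (10 : ℤ) ^ L :=
  (pexp_facts L h hL hmem).2.2.2.1

lemma altOuter_found (f : ℕ) : ∀ (L : ℕ) (value m : Int), 2 ≤ value →
    G value m → (∀ j, G value j → m ≤ j) → 1 ≤ L → L + f ≤ 13 →
    (10 : ℤ) ^ (L - 1) ≤ m → m < 10 ^ (L + f - 1) →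
    altOuter f value L = m := by
  induction f with
  | zero =>
    intro L value m _ _ _ _ _ hlo hhi
    exact absurd (lt_of_le_of_lt hlo (by simpa using hhi)) (lt_irrefl _)
  | succ f ih =>
    intro L value m hv hGm hmin hL1 hL13 hlo hhi
    have hm0 : 0 ≤ m := by have := hGm.1; omega
    have hm3 : 2 < m := by have := hGm.1; omega
    rw [altOuter]
    by_cases hcase : m < 10 ^ L
    · -- m has exactly L digits: the inner loop finds it
      have hcl : ((10 ^ (L - 1) : ℕ) : ℤ) = (10:ℤ) ^ (L - 1) := by push_cast; ring
      have hch : ((10 ^ L : ℕ) : ℤ) = (10:ℤ) ^ L := by push_cast; ring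
      have hmlo : 10 ^ (L - 1) ≤ m.toNat := by rw [← hcl] at hlo; omega
      have hmhi : m.toNat < 10 ^ L := by rw [← hch] at hcase; omega
      have hlenm : (Nat.digits 10 m.toNat).length = L := by
        have h1 : (Nat.digits 10 m.toNat).length ≤ L := (Nat.digits_length_le_iff (by norm_num) _).mpr hmhi
        have h2 : L - 1 < (Nat.digits 10 m.toNat).length := (Nat.lt_digits_length_iff (by norm_num) _).mpr hmlo
        omega
      have hpalm : (Nat.digits 10 m.toNat).reverse = Nat.digits 10 m.toNat :=
        (is_palindrome_iff m hm0).mp hGm.2.2.1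
      obtain ⟨hclo, hchi, hcbuild⟩ := buildN_complete L m.toNat (by omega) hpalm hlenm
      set h₀N := m.toNat / 10 ^ (L / 2) with hh₀N
      have hcl2 : ((10 ^ ((L + 1) / 2 - 1) : ℕ) : ℤ) = (10:ℤ) ^ ((L + 1) / 2 - 1) := by push_cast; ring
      have hch2 : ((10 ^ ((L + 1) / 2) : ℕ) : ℤ) = (10:ℤ) ^ ((L + 1) / 2) := by push_cast; ring
      have hblo : (10:ℤ) ^ ((L + 1) / 2 - 1) ≤ (h₀N : ℤ) := by rw [← hcl2]; exact_mod_cast hclo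
      have hbhi : (h₀N : ℤ) < (10:ℤ) ^ ((L + 1) / 2) := by rw [← hch2]; exact_mod_cast hchi
      have hpexp : pexp L (h₀N : ℤ) = m := by
        rw [pexp_eqN L _ (by positivity), Int.toNat_natCast, hcbuild]
        omega
      have hsplit : PySem.List.pyRange (10 ^ ((L + 1) / 2 - 1)) (10 ^ ((L + 1) / 2)) 1
          = PySem.List.pyRange (10 ^ ((L + 1) / 2 - 1)) (h₀N : ℤ) 1 ++ (h₀N : ℤ) :: PySem.List.pyRange ((h₀N : ℤ) + 1) (10 ^ ((L + 1) / 2)) 1 := by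
        rw [PySem.List.pyRange_one_append _ (h₀N : ℤ) _ hblo (by omega), PySem.List.pyRange_one_cons hbhi]
      rw [hsplit, altInner_found]
      · rw [hpexp]
      · intro x hx
        rw [PySem.List.mem_pyRange_one] at hx
        cases hpb : (value < pexp L x && altIsPrime (pexp L x)) with
        | false => rfl
        | true =>
          exfalso
          have hmemx : x ∈ PySem.List.pyRange (10 ^ ((L + 1) / 2 - 1)) (10 ^ ((L + 1) / 2)) 1 := by
            rw [PySem.List.mem_pyRange_one]
            exact ⟨hx.1, by omega⟩
          have hGx := G_of_build value L x hL1 (by omega) hmemx hpb hv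
          have hge := hmin _ hGx
          have hx0 : 0 ≤ x := by
            have h1 := hx.1
            have h2 : (0:ℤ) < 10 ^ ((L + 1) / 2 - 1) := by positivity
            omega
          have hxlt : pexp L x < m := by
            rw [pexp_eqN L x hx0, ← hpexp, pexp_eqN L _ (by positivity), Int.toNat_natCast]
            have hxN : x.toNat < h₀N := by
              have := hx.2
              omega
            have hxhi : x.toNat < 10 ^ ((L + 1) / 2) := by
              rw [← hch2] at hbhi
              omega
            exact_mod_cast buildN_mono L x.toNat h₀N hxN (by omega)
          omega
      · rw [hpexp, Bool.and_eq_true, decide_eq_true_eq]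
        exact ⟨hGm.1, by rw [altIsPrime_eq _ (by omega)]; exact hGm.2.2.2⟩
    · -- every L-digit palindrome is below m: the inner loop fails, recurse
      push_neg at hcase
      rw [altInner_none]
      · have hsh : L + (f + 1) - 1 = (L + 1) + f - 1 := by omega
        rw [hsh] at hhi
        exact ih (L + 1) value m hv hGm hmin (by omega) (by omega) (by simpa using hcase) hhi
      · intro x hx
        cases hpb : (value < pexp L x && altIsPrime (pexp L x)) with
        | false => rfl
        | true =>
          exfalso
          have hGx := G_of_build value L x hL1 (by omega) hx hpb hv
          have hge := hmin _ hGx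
          have hxlt : pexp L x < (10:ℤ) ^ L := pexp_lt_pow L x hL1 hx
          omega

lemma altOuter_none (f : ℕ) : ∀ (L : ℕ) (value : Int), 2 ≤ value →
    (∀ j, ¬ G value j) → 1 ≤ L → L + f ≤ 13 →
    altOuter f value L = 0 := by
  induction f with
  | zero => intro L value _ _ _ _; rfl
  | succ f ih =>
    intro L value hv hno hL1 hL13
    rw [altOuter]
    rw [altInner_none]
    · exact ih (L + 1) value hv hno (by omega) (by omega)
    · intro x hx
      cases hpb : (value < pexp L x && altIsPrime (pexp L x)) with
      | false => rfl
      | true => exact absurd (G_of_build value L x hL1 (by omega) hx hpb hv) (hno _)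

-- ===== VERDICT (by name: the statement is the Claim_ definition above) =====
theorem find_prime_palindrome_spec : Claim_equal_find_prime_palindrome := by
  intro value hdom
  unfold Spec_find_prime_palindrome
  unfold find_prime_palindrome find_prime_palindrome_alt
  by_cases hlt2 : value < 2
  · rw [if_pos hlt2, if_pos hlt2]
  · rw [if_neg hlt2, if_neg hlt2]
    push_neg at hlt2
    have hdom' : value ≤ 2147483648 := by
      unfold Dom_find_prime_palindrome pvDomInt at hdom
      simp only [decide_eq_true_eq] at hdom
      exact hdom.2
    set v := if PySem.Int.mod value 2 == 0 then value - 1 else value with hv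
    have hmod : PySem.Int.mod value 2 = value % 2 := PySem.Int.mod_eq_emod_of_pos (by norm_num)
    have hvfacts : v % 2 = 1 ∧ value - 1 ≤ v ∧ v ≤ value := by
      rw [hv, hmod]
      by_cases hpar : value % 2 = 0
      · rw [if_pos (by simp [hpar])]; omega
      · rw [if_neg (by simp [hpar])]; omega
    obtain ⟨hvo, hv1, hv2'⟩ := hvfacts
    have hP10 : (10:ℤ) ^ 12 = 1000000000000 := by norm_num
    have hfuel : v + 2 * (((((10:ℤ) ^ 12 - v) / 2).toNat : ℕ) : ℤ) = 10 ^ 12 - 1 := by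
      rw [hP10]
      omega
    letI : DecidablePred (fun t : ℕ => G value (value + 1 + (t : ℤ))) := fun t => by
      unfold G
      infer_instance
    by_cases hex : ∃ n : ℤ, G value n
    · obtain ⟨n₀, hn₀⟩ := hex
      have hex' : ∃ t : ℕ, G value (value + 1 + (t : ℤ)) := by
        refine ⟨(n₀ - value - 1).toNat, ?_⟩
        have he : value + 1 + (((n₀ - value - 1).toNat : ℕ) : ℤ) = n₀ := by
          have := hn₀.1
          omega
        rw [he]
        exact hn₀
      set m := value + 1 + ((Nat.find hex' : ℕ) : ℤ) with hm
      have hGm : G value m := Nat.find_spec hex'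
      have hmin : ∀ j, G value j → m ≤ j := by
        intro j hj
        have hj1 := hj.1
        have he : value + 1 + (((j - value - 1).toNat : ℕ) : ℤ) = j := by omega
        have hfind : Nat.find hex' ≤ (j - value - 1).toNat :=
          Nat.find_min' hex' (by rw [he]; exact hj)
        omega
      have hmval : value < m := hGm.1
      have hmlt : m < 1000000000000 := by
        have := hGm.2.1
        omega
      have hmodd : m % 2 = 1 := by
        rcases Int.emod_two_eq m with h | h
        · exfalso
          have hdvd : (2:ℤ) ∣ m := by omega
          have hfalse := is_prime_even m (by omega) hdvd
          have htrue := hGm.2.2.2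
          simp [hfalse] at htrue
        · exact h
      have hA : findLoopA (((10:ℤ) ^ 12 - v) / 2).toNat v = m := by
        apply findLoopA_found
        · omega
        · omega
        · omega
        · rw [Bool.and_eq_true]
          exact ⟨hGm.2.2.1, hGm.2.2.2⟩
        · intro j hj1 hj2 hj3
          cases hq : (is_palindrome j && is_prime j) with
          | false => rfl
          | true =>
            exfalso
            rw [Bool.and_eq_true] at hq
            have hGj : G value j := ⟨by omega, by rw [hP10]; omega, hq.1, hq.2⟩
            have := hmin j hGj
            omega
      have hB : altOuter 12 value 1 = m := by
        apply altOuter_found 12 1 value m hlt2 hGm hmin le_rfl (by norm_num)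
        · rw [(by norm_num : ((10:ℤ) ^ (1 - 1) : ℤ) = 1)]
          omega
        · rw [(by norm_num : ((10:ℤ) ^ (1 + 12 - 1) : ℤ) = 1000000000000)]
          omega
      rw [hA, hB]
    · push_neg at hex
      have hA : findLoopA (((10:ℤ) ^ 12 - v) / 2).toNat v = 0 := by
        apply findLoopA_none
        intro j hj1 hj2 hj3
        cases hq : (is_palindrome j && is_prime j) with
        | false => rfl
        | true =>
          exfalso
          rw [Bool.and_eq_true] at hq
          exact hex j ⟨by omega, by rw [hP10]; omega, hq.1, hq.2⟩
      have hB := altOuter_none 12 1 value hlt2 hex le_rfl (by norm_num)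
      rw [hA, hB]
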